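-- pv_equiv track=rewrite | github.com/Pandaemonium/CausalOctonionGraph | calc/sedenion_gen.py | s3_orbit_under_group_action
-- ===== SOURCE A (Python) =====
-- from itertools import permutations
-- from typing import Dict, FrozenSet, List, Set, Tuple
--
-- def apply_s3_to_index(
--     idx: int,
--     groups: List[List[int]],
--     group_perm: Tuple[int, int, int],
-- ) -> int:
--     """
--     Apply an S3 element (specified as a permutation of group indices) to
--     a basis index.
--
--     The permutation maps group_perm[g] <- g, i.e., elements from group g
--     are sent to the position of group group_perm[g].
--
--     Returns the new basis index after permutation.
--     """
--     if idx == 0: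
--         return 0  # real unit is fixed
--
--     for g_idx, group in enumerate(groups):
--         if idx in group:
--             tgt_g = group_perm[g_idx]
--             pos = group.index(idx)
--             tgt_group = groups[tgt_g]
--             if pos < len(tgt_group):
--                 return tgt_group[pos]
--             return idx  # fallback: fixed
--
--     return idx  # idx not in any group: fixed
--
-- def s3_act_on_triple(
--     triple: FrozenSet[int],
--     groups: List[List[int]],
--     group_perm: Tuple[int, int, int],
-- ) -> FrozenSet[int]:
--     """
--     Apply an S3 element to an unordered Witt triple, returning the new triple.
--     """
--     return frozenset(
--         apply_s3_to_index(idx, groups, group_perm)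
--         for idx in triple
--     )
--
-- def s3_orbit_under_group_action(
--     triple: FrozenSet[int],
--     groups: List[List[int]],
-- ) -> FrozenSet[FrozenSet[int]]:
--     """
--     Compute the S3 orbit of an unordered Witt triple under all 6 permutations
--     of the three Witt-pair label groups.
--     """
--     orbit = set()
--     for perm in permutations(range(3)):
--         new_triple = s3_act_on_triple(triple, groups, perm)
--         orbit.add(new_triple)
--     return frozenset(orbit)
-- ===== SOURCE B (Python) =====
-- PERMS = ((0, 1, 2), (0, 2, 1), (1, 0, 2), (1, 2, 0), (2, 0, 1), (2, 1, 0))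
--
-- def s3_orbit_under_group_action(triple, groups):
--     # Element-major matrix strategy: for each triple element compute, in one go,
--     # its full row of 6 images (one per S3 element) -- the row is just the
--     # element's 3 possible transported values selected per permutation.  The six
--     # image triples are then the COLUMNS of this matrix (a transpose), and the
--     # orbit is the deduplication of the columns.  A instead recomputes every
--     # element from scratch inside each of the 6 permutation passes.
--     rows = []
--     for idx in triple:
--         if idx == 0:
--             rows.append((0,) * 6)
--             continue
--         hit = next(((g, grp.index(idx)) for g, grp in enumerate(groups) if idx in grp), None)
--         if hit is None:
--             rows.append((idx,) * 6)
--             continue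
--         g, pos = hit
--         tvec = tuple(grp2[pos] if pos < len(grp2) else idx for grp2 in groups[:3])
--         rows.append(tuple(tvec[p[g]] for p in PERMS))
--     # transpose: column k is the image of the triple under PERMS[k]
--     images = [frozenset(row[k] for row in rows) for k in range(6)]
--     orbit = []
--     for img in images:
--         if img not in orbit:
--             orbit.append(img)
--     return frozenset(orbit)
-- ===== Notes on version B (the rewrite author's own statement) =====
-- stated objective: alternative
-- what changed: B inverts the loop nesting: one element-major pass computes, per triple element, its full row of 6 images at once (via its 3 possible transported values), then the six orbit members are obtained by transposing the rows into columns and deduplicating them, whereas A runs 6 permutation-major passes each rescanning groups and recomputing every element from scratch.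
import Mathlib
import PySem

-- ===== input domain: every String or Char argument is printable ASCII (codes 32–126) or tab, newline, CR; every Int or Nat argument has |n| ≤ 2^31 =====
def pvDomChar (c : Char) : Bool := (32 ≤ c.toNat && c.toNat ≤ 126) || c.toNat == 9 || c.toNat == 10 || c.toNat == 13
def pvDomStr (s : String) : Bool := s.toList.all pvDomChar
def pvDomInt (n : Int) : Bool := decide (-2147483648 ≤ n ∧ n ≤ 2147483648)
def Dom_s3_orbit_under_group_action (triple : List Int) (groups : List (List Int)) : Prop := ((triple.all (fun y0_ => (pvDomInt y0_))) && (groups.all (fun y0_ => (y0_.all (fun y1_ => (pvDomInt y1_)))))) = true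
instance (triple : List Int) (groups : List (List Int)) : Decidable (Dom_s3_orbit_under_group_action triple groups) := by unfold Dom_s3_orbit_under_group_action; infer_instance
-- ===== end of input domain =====

-- B inverts A's loop nesting: one element-major pass builds each element's row of
-- 6 images at once and the orbit is the dedup of the transposed columns
-- (alternative decomposition; return values proved equal on Pre_).

-- The 6 permutations of (0,1,2) in itertools.permutations order (shared literal data).
def pvPerms3 : List (List Int) := [[0,1,2],[0,2,1],[1,0,2],[1,2,0],[2,0,1],[2,1,0]]

-- hand-ported: add a frozenset to a frozenset list unless already present
-- (membership by frozenset equality = set equality); exact.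
def pvAddFS (orbit : List (List Int)) (t : List Int) : List (List Int) :=
  if orbit.any (fun u => PySem.Set.equal u t) then orbit else orbit ++ [t]

-- ===== PORT A =====
-- the `for g_idx, group in enumerate(groups)` loop of apply_s3_to_index
def pvApplyLoop (idx : Int) (groups : List (List Int)) (perm : List Int) :
    List (Int × List Int) → Int
  | [] => idx
  | (g, group) :: rest =>
    if group.contains idx then
      let tgt_g := PySem.List.pyGetD perm g 0
      let pos : Nat := (PySem.List.index? group idx).getD 0
      let tgt_group := PySem.List.pyGetD groups tgt_g []
      if (pos : Int) < (tgt_group.length : Int) then PySem.List.pyGetD tgt_group (pos : Int) idx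
      else idx
    else pvApplyLoop idx groups perm rest

def apply_s3_to_index (idx : Int) (groups : List (List Int)) (perm : List Int) : Int :=
  if idx = 0 then 0
  else pvApplyLoop idx groups perm (PySem.List.enumerate groups 0)

def s3_act_on_triple (triple : List Int) (groups : List (List Int)) (perm : List Int) : List Int :=
  PySem.Set.ofList (triple.map (fun idx => apply_s3_to_index idx groups perm))

def s3_orbit_under_group_action (triple : List Int) (groups : List (List Int)) : List (List Int) :=
  pvPerms3.foldl (fun orbit perm => pvAddFS orbit (s3_act_on_triple triple groups perm)) []

-- ===== PORT B =====
-- the `next(((g, grp.index(idx)) for g, grp in enumerate(groups) if idx in grp), None)` scan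
def pvFindHit (idx : Int) : List (Int × List Int) → Option (Int × Nat)
  | [] => none
  | (g, grp) :: rest =>
    if grp.contains idx then some (g, (PySem.List.index? grp idx).getD 0)
    else pvFindHit idx rest

-- one element's row of 6 images (its image under each permutation of pvPerms3)
def pvRow (idx : Int) (groups : List (List Int)) : List Int :=
  if idx = 0 then [0, 0, 0, 0, 0, 0]
  else
    match pvFindHit idx (PySem.List.enumerate groups 0) with
    | none => [idx, idx, idx, idx, idx, idx]
    | some (g, pos) =>
      let tvec := (groups.take 3).map
        (fun grp2 => if (pos : Int) < (grp2.length : Int) then PySem.List.pyGetD grp2 (pos : Int) idx else idx)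
      pvPerms3.map (fun p => PySem.List.pyGetD tvec (PySem.List.pyGetD p g 0) 0)

-- matrix build, transpose into the 6 image columns, then dedup the columns
-- (Python's final frozenset(orbit) over the already-distinct list is the identity).
def s3_orbit_under_group_action_alt (triple : List Int) (groups : List (List Int)) : List (List Int) :=
  let rows := triple.map (fun idx => pvRow idx groups)
  let images := (PySem.List.pyRange 0 6 1).map
    (fun k => PySem.Set.ofList (rows.map (fun r => PySem.List.pyGetD r k 0)))
  images.foldl pvAddFS []

-- ===== PRECONDITION & SPEC =====
-- Pre_ excludes exactly the inputs where Python A raises an IndexError: a nonzero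
-- triple element occurring in some group while there are fewer than 3 groups, or an
-- element whose first containing group has index ≥ 3.
def Pre_s3_orbit_under_group_action (triple : List Int) (groups : List (List Int)) : Prop :=
  ∀ idx ∈ triple, idx ≠ 0 → (∃ g ∈ groups, idx ∈ g) →
    (3 ≤ groups.length ∧ ∃ g ∈ groups.take 3, idx ∈ g)
instance (triple : List Int) (groups : List (List Int)) : Decidable (Pre_s3_orbit_under_group_action triple groups) := by unfold Pre_s3_orbit_under_group_action; infer_instance

def pvWitness_s3_orbit_under_group_action : List Int × List (List Int) :=
  ([1, 3, 5], [[1, 2], [3, 4], [5, 6]])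

def Spec_s3_orbit_under_group_action (triple : List Int) (groups : List (List Int)) (out : List (List Int)) : Prop := out = s3_orbit_under_group_action_alt triple groups
instance (triple : List Int) (groups : List (List Int)) (out : List (List Int)) : Decidable (Spec_s3_orbit_under_group_action triple groups out) := by unfold Spec_s3_orbit_under_group_action; infer_instance

-- ===== CLAIM (what is proved, stated in full; the proofs are below) =====
def Claim_equal_s3_orbit_under_group_action : Prop := ∀ (triple : List Int) (groups : List (List Int)), Dom_s3_orbit_under_group_action triple groups → Pre_s3_orbit_under_group_action triple groups → Spec_s3_orbit_under_group_action triple groups (s3_orbit_under_group_action triple groups)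

-- ===== LEMMAS AND PROOFS =====

-- A's scan agrees with B's first-hit scan
lemma pvLoopEq (idx : Int) (groups0 : List (List Int)) (perm : List Int) :
    ∀ (gs : List (List Int)) (s : Int),
    pvApplyLoop idx groups0 perm (PySem.List.enumerate gs s)
      = match pvFindHit idx (PySem.List.enumerate gs s) with
        | none => idx
        | some (g, pos) =>
          let tgt := PySem.List.pyGetD groups0 (PySem.List.pyGetD perm g 0) []
          if (pos : Int) < (tgt.length : Int) then PySem.List.pyGetD tgt (pos : Int) idx else idx := by
  intro gs
  induction gs with
  | nil => intro s; simp [PySem.List.enumerate_nil, pvApplyLoop, pvFindHit]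
  | cons group rest ih =>
    intro s
    rw [PySem.List.enumerate_cons]
    simp only [pvApplyLoop, pvFindHit]
    by_cases hc : group.contains idx
    · rw [if_pos hc, if_pos hc]
    · rw [if_neg hc, if_neg hc, ih]

lemma pvFindHit_mem (idx : Int) :
    ∀ (gs : List (List Int)) (s : Int) (g : Int) (pos : Nat),
    pvFindHit idx (PySem.List.enumerate gs s) = some (g, pos) → ∃ grp ∈ gs, idx ∈ grp := by
  intro gs
  induction gs with
  | nil => intro s g pos h; simp [PySem.List.enumerate_nil, pvFindHit] at h
  | cons grp rest ih =>
    intro s g pos h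
    rw [PySem.List.enumerate_cons] at h
    simp only [pvFindHit] at h
    by_cases hc : grp.contains idx
    · exact ⟨grp, by simp, by simpa using hc⟩
    · rw [if_neg hc] at h
      obtain ⟨grp', h1, h2⟩ := ih (s + 1) g pos h
      exact ⟨grp', by simp [h1], h2⟩

lemma pvFindHit_ge (idx : Int) :
    ∀ (gs : List (List Int)) (s : Int) (g : Int) (pos : Nat),
    pvFindHit idx (PySem.List.enumerate gs s) = some (g, pos) → s ≤ g := by
  intro gs
  induction gs with
  | nil => intro s g pos h; simp [PySem.List.enumerate_nil, pvFindHit] at h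
  | cons grp rest ih =>
    intro s g pos h
    rw [PySem.List.enumerate_cons] at h
    simp only [pvFindHit] at h
    by_cases hc : grp.contains idx
    · rw [if_pos hc] at h; simp at h; omega
    · rw [if_neg hc] at h
      have := ih (s + 1) g pos h
      omega

lemma pvFindHit_lt (idx : Int) :
    ∀ (gs : List (List Int)) (n : Nat) (s : Int) (g : Int) (pos : Nat),
    pvFindHit idx (PySem.List.enumerate gs s) = some (g, pos) →
    (∃ grp ∈ gs.take n, idx ∈ grp) → g < s + n := by
  intro gs
  induction gs with
  | nil => intro n s g pos h _; simp [PySem.List.enumerate_nil, pvFindHit] at h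
  | cons grp rest ih =>
    intro n s g pos h hex
    cases n with
    | zero => simp at hex
    | succ m =>
      rw [PySem.List.enumerate_cons] at h
      simp only [pvFindHit] at h
      by_cases hc : grp.contains idx
      · rw [if_pos hc] at h; simp at h; omega
      · rw [if_neg hc] at h
        have hex' : ∃ grp' ∈ rest.take m, idx ∈ grp' := by
          obtain ⟨grp', h1, h2⟩ := hex
          rw [List.take_succ_cons] at h1
          rcases List.mem_cons.mp h1 with rfl | h1'
          · exact absurd h2 (by simpa using hc)
          · exact ⟨grp', h1', h2⟩
        have := ih m (s + 1) g pos h hex'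
        omega

-- elements of the six permutations are in {0,1,2}
lemma pvPermGetRange (p : List Int) (hp : p ∈ pvPerms3) (g : Int) (h0 : 0 ≤ g) (h3 : g < 3) :
    0 ≤ PySem.List.pyGetD p g 0 ∧ PySem.List.pyGetD p g 0 < 3 := by
  have hp' : p ∈ [([0,1,2] : List Int), [0,2,1], [1,0,2], [1,2,0], [2,0,1], [2,1,0]] := by
    simpa [pvPerms3] using hp
  fin_cases hp' <;> interval_cases g <;> exact ⟨by decide, by decide⟩

-- B's transported-value vector agrees with A's direct lookup, for in-range targets
lemma pvCore (groups : List (List Int)) (hlen : 3 ≤ groups.length) (pos : Nat) (idx t : Int)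
    (ht0 : 0 ≤ t) (ht3 : t < 3) :
    PySem.List.pyGetD
      ((groups.take 3).map
        (fun grp2 => if (pos : Int) < (grp2.length : Int) then grp2.getD pos idx else idx))
      t 0
    = (if (pos : Int) < ((PySem.List.pyGetD groups t []).length : Int)
       then (PySem.List.pyGetD groups t []).getD pos idx else idx) := by
  lift t to Nat using ht0 with m
  have hm : m < 3 := by exact_mod_cast ht3
  match groups, hlen with
  | a :: b :: c :: rest, _ =>
    simp only [PySem.List.pyGetD_natCast]
    interval_cases m <;> rfl

-- getD of a map over the fixed six-permutation list
lemma pvGetDMapPerms (f : List Int → Int) (n : Nat) (hn : n < 6) :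
    (pvPerms3.map f).getD n 0 = f (pvPerms3.getD n []) := by
  interval_cases n <;> rfl

-- pointwise: entry k of B's row = A's apply_s3_to_index under permutation k
lemma pvPointEq (groups : List (List Int)) (idx : Int)
    (hpre : idx ≠ 0 → (∃ g ∈ groups, idx ∈ g) → 3 ≤ groups.length ∧ ∃ g ∈ groups.take 3, idx ∈ g)
    (k : Int) (hk0 : 0 ≤ k) (hk6 : k < 6) :
    PySem.List.pyGetD (pvRow idx groups) k 0
      = apply_s3_to_index idx groups (PySem.List.pyGetD pvPerms3 k []) := by
  lift k to Nat using hk0 with n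
  have hn : n < 6 := by exact_mod_cast hk6
  unfold pvRow apply_s3_to_index
  by_cases h0 : idx = 0
  · rw [if_pos h0, if_pos h0]
    simp only [PySem.List.pyGetD_natCast]
    interval_cases n <;> rfl
  · rw [if_neg h0, if_neg h0, pvLoopEq]
    cases hh : pvFindHit idx (PySem.List.enumerate groups 0) with
    | none =>
      show PySem.List.pyGetD ([idx, idx, idx, idx, idx, idx]) (n : Int) 0 = idx
      simp only [PySem.List.pyGetD_natCast]
      interval_cases n <;> rfl
    | some gp =>
      obtain ⟨g, pos⟩ := gp
      show PySem.List.pyGetD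
          (pvPerms3.map (fun p => PySem.List.pyGetD
            ((groups.take 3).map
              (fun grp2 => if (pos : Int) < (grp2.length : Int) then PySem.List.pyGetD grp2 (pos : Int) idx else idx))
            (PySem.List.pyGetD p g 0) 0)) (n : Int) 0
        = (if (pos : Int) < ((PySem.List.pyGetD groups (PySem.List.pyGetD (PySem.List.pyGetD pvPerms3 (n : Int) []) g 0) []).length : Int)
           then PySem.List.pyGetD (PySem.List.pyGetD groups (PySem.List.pyGetD (PySem.List.pyGetD pvPerms3 (n : Int) []) g 0) []) (pos : Int) idx
           else idx)
      obtain ⟨hlen, htake⟩ := hpre h0 (pvFindHit_mem idx groups 0 g pos hh)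
      have hg0 : 0 ≤ g := pvFindHit_ge idx groups 0 g pos hh
      have hg3 : g < 3 := by
        have := pvFindHit_lt idx groups 3 0 g pos hh htake
        omega
      simp only [PySem.List.pyGetD_natCast]
      rw [pvGetDMapPerms _ n hn]
      have hp : pvPerms3.getD n [] ∈ pvPerms3 := by
        interval_cases n <;> decide
      obtain ⟨ht0, ht3⟩ := pvPermGetRange _ hp g hg0 hg3
      exact pvCore groups hlen pos idx _ ht0 ht3

-- column k of the matrix is A's image triple under permutation k
lemma pvColEq (triple : List Int) (groups : List (List Int))
    (hpre : Pre_s3_orbit_under_group_action triple groups) (k : Int) (hk0 : 0 ≤ k) (hk6 : k < 6) :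
    PySem.Set.ofList ((triple.map (fun idx => pvRow idx groups)).map
        (fun r => PySem.List.pyGetD r k 0))
      = s3_act_on_triple triple groups (PySem.List.pyGetD pvPerms3 k []) := by
  unfold s3_act_on_triple
  congr 1
  rw [List.map_map]
  exact List.map_congr_left (fun idx hidx => pvPointEq groups idx (hpre idx hidx) k hk0 hk6)

-- ===== VERDICT (by name: the statement is the Claim_ definition above) =====
theorem s3_orbit_under_group_action_spec : Claim_equal_s3_orbit_under_group_action := by
  intro triple groups _ hpre
  unfold Spec_s3_orbit_under_group_action
  unfold s3_orbit_under_group_action s3_orbit_under_group_action_alt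
  simp only []
  have h0 := pvColEq triple groups hpre 0 (by norm_num) (by norm_num)
  have h1 := pvColEq triple groups hpre 1 (by norm_num) (by norm_num)
  have h2 := pvColEq triple groups hpre 2 (by norm_num) (by norm_num)
  have h3 := pvColEq triple groups hpre 3 (by norm_num) (by norm_num)
  have h4 := pvColEq triple groups hpre 4 (by norm_num) (by norm_num)
  have h5 := pvColEq triple groups hpre 5 (by norm_num) (by norm_num)
  rw [show PySem.List.pyGetD pvPerms3 0 [] = [0,1,2] from by decide] at h0
  rw [show PySem.List.pyGetD pvPerms3 1 [] = [0,2,1] from by decide] at h1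
  rw [show PySem.List.pyGetD pvPerms3 2 [] = [1,0,2] from by decide] at h2
  rw [show PySem.List.pyGetD pvPerms3 3 [] = [1,2,0] from by decide] at h3
  rw [show PySem.List.pyGetD pvPerms3 4 [] = [2,0,1] from by decide] at h4
  rw [show PySem.List.pyGetD pvPerms3 5 [] = [2,1,0] from by decide] at h5
  rw [show PySem.List.pyRange 0 6 1 = [0,1,2,3,4,5] from by decide]
  simp only [List.map_cons, List.map_nil, List.foldl_cons, List.foldl_nil]
  rw [h0, h1, h2, h3, h4, h5]
  simp only [pvPerms3, List.foldl_cons, List.foldl_nil]
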